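-- pv_equiv track=rewrite | github.com/Aura-healthcare/ecg_seizure_detection_benchmarks | src/projet_CS/evaluate_clean.py | multiple_annotated_seizures_evaluation
-- ===== SOURCE A (Python) =====
-- VALIDITY_TIME_OF_DETECTION_BEFORE_SEIZURE=45 #in seconds
--
-- def multiple_annotated_seizures_evaluation(output_evaluation,json_output,annotation):
--     if len(json_output["seizure"])==0:
--         for j in range(len(annotation)):          #Aucune des multiples crises annotées n'a été détectée
--             output_evaluation.append([1,0])
--     else :
--         for seizure_number in range(len(annotation["seizure"])): #Un traitement par crise annotée
--             output_evaluation,json_output=evaluation_on_one_of_the_multiple_annotated_seizures(output_evaluation,json_output,annotation,seizure_number)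
--         if len(json_output["seizure"])>0:                              #Les crises restantes sont des mauvaises détections/fausses alertes
--             for n in range(len(json_output["seizure"])):
--                 output_evaluation.append([0,1])
--     return(output_evaluation)
--
-- def evaluation_on_one_of_the_multiple_annotated_seizures(output_evaluation,json_output,annotation,seizure_number):
--     annotated_t_start=annotation["seizure"][seizure_number][0]
--     annotated_t_end=annotation["seizure"][seizure_number][1]
--     good_predictions=[]
--     detection=False
--     for detection_number in range(len(json_output["seizure"])):
--         prediction_t_start=json_output["seizure"][detection_number][0]
--         if seizure_good_detection_assertion(annotated_t_start,annotated_t_end,prediction_t_start):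
--             good_predictions.append(detection_number)
--             output_evaluation.append([1,1])
--             detection=True
--     if not detection:
--         output_evaluation.append([1,0])
--     for i in sorted(good_predictions, reverse = True):
--         del(json_output["seizure"][i])
--     return(output_evaluation,json_output)
--
-- def seizure_good_detection_assertion(annotated_t_start, annotated_t_end, predicted_t_start):
--     """
--     Is used to evaluate if a prediction about an annotated seizure can be considered as accurate
--     """
--     if (predicted_t_start>=annotated_t_start-VALIDITY_TIME_OF_DETECTION_BEFORE_SEIZURE and predicted_t_start<=annotated_t_end):
--         return True
--     else:
--         return False
-- ===== SOURCE B (Python) =====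
-- VALIDITY_TIME_OF_DETECTION_BEFORE_SEIZURE = 45  # in seconds
--
-- # Same return value as A; like A it mutates output_evaluation in place and leaves
-- # only the unmatched detections in json_output["seizure"].
-- def multiple_annotated_seizures_evaluation(output_evaluation, json_output, annotation):
--     detections = json_output["seizure"]
--     if len(detections) == 0:
--         for _ in range(len(annotation)):
--             output_evaluation.append([1, 0])
--         return output_evaluation
--     seizures = annotation["seizure"]
--
--     def first_match(d):
--         # index of the earliest annotated seizure whose window contains the detection start
--         for k, s in enumerate(seizures):
--             if s[0] - VALIDITY_TIME_OF_DETECTION_BEFORE_SEIZURE <= d[0] <= s[1]: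
--                 return k
--         return None
--
--     assigned = [first_match(d) for d in detections]
--     leftover = [d for d in detections if first_match(d) is None]
--     for k in range(len(seizures)):
--         c = assigned.count(k)
--         if c == 0:
--             output_evaluation.append([1, 0])
--         else:
--             output_evaluation.extend([1, 1] for _ in range(c))
--     output_evaluation.extend([0, 1] for _ in leftover)
--     json_output["seizure"][:] = leftover
--     return output_evaluation
-- ===== Notes on version B (the rewrite author's own statement) =====
-- stated objective: alternative
-- what changed: Replaces A's seizure-outer loop that rescans and deletes matched detections from json_output['seizure'] with a detection-major pass assigning each detection to its earliest matching seizure, then emits rows from per-seizure match counts and a leftover list.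
import Mathlib
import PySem

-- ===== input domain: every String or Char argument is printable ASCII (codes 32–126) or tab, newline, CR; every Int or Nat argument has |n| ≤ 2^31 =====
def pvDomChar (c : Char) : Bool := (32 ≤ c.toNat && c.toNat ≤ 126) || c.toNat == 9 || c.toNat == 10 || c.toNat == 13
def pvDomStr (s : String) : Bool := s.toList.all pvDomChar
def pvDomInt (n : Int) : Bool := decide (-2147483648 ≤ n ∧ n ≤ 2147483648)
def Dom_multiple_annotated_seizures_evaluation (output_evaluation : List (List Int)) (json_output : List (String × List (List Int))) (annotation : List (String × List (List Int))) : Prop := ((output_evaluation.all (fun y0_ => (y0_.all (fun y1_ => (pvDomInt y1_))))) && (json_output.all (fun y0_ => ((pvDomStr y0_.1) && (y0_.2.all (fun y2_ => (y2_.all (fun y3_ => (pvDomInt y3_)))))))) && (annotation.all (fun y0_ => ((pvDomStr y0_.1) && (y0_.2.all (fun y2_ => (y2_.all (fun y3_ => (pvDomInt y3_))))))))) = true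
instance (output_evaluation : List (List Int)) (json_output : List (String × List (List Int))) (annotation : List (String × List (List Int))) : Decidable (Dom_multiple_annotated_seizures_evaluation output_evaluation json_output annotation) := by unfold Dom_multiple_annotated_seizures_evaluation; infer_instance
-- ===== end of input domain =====

-- B replaces the seizure-outer / delete-matched-detections scan with a single first-match
-- assignment per detection plus a count-based emission pass (objective: alternative, same cost).
-- Both A and B mutate output_evaluation and json_output["seizure"] in place identically;
-- the equivalence proved here is about the RETURN value.

-- shared dict-convention helper: d[k] lookup (getD [] where Python would raise KeyError; excluded by Pre_)
def pvGetKey (d : List (String × List (List Int))) (k : String) : List (List Int) :=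
  (PySem.Dict.ofList d).getD k []

-- ===== PORT A =====
def seizure_good_detection_assertion (annotated_t_start annotated_t_end predicted_t_start : Int) : Bool :=
  if predicted_t_start ≥ annotated_t_start - 45 ∧ predicted_t_start ≤ annotated_t_end then true else false

-- del l[i]  (the .getD l branch is unreachable inside Pre_)
def pvDelAt (l : List (List Int)) (i : Int) : List (List Int) :=
  ((PySem.List.pop? l i).map (·.2)).getD l

-- Python's helper carries the whole json_output dict but only its "seizure" list is live; the
-- port threads that list (json_seizure) as the mutable state.
def evaluation_on_one_of_the_multiple_annotated_seizures
    (output_evaluation : List (List Int)) (json_seizure : List (List Int))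
    (annotation : List (String × List (List Int))) (seizure_number : Int) :
    List (List Int) × List (List Int) :=
  let seiz := PySem.List.pyGetD (pvGetKey annotation "seizure") seizure_number []
  let annotated_t_start := PySem.List.pyGetD seiz 0 0
  let annotated_t_end := PySem.List.pyGetD seiz 1 0
  let st := (PySem.List.pyRange 0 json_seizure.length 1).foldl
    (fun (st : List Int × List (List Int) × Bool) detection_number =>
      let prediction_t_start := PySem.List.pyGetD (PySem.List.pyGetD json_seizure detection_number []) 0 0
      if seizure_good_detection_assertion annotated_t_start annotated_t_end prediction_t_start then
        (st.1 ++ [detection_number], st.2.1 ++ [[1, 1]], true)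
      else st)
    ([], output_evaluation, false)
  let output2 := if st.2.2 then st.2.1 else st.2.1 ++ [[1, 0]]
  let json2 := (PySem.List.sorted st.1 (fun x => x) true).foldl pvDelAt json_seizure
  (output2, json2)

def multiple_annotated_seizures_evaluation (output_evaluation : List (List Int)) (json_output : List (String × List (List Int))) (annotation : List (String × List (List Int))) : List (List Int) :=
  if (pvGetKey json_output "seizure").length == 0 then
    (PySem.List.pyRange 0 (PySem.Dict.ofList annotation).size 1).foldl
      (fun acc _ => acc ++ [[1, 0]]) output_evaluation
  else
    let st := (PySem.List.pyRange 0 (pvGetKey annotation "seizure").length 1).foldl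
      (fun (st : List (List Int) × List (List Int)) seizure_number =>
        evaluation_on_one_of_the_multiple_annotated_seizures st.1 st.2 annotation seizure_number)
      (output_evaluation, pvGetKey json_output "seizure")
    if st.2.length > 0 then
      (PySem.List.pyRange 0 st.2.length 1).foldl (fun acc _ => acc ++ [[0, 1]]) st.1
    else st.1

-- ===== PORT B =====
-- index of the earliest annotated seizure whose window contains the detection start
def pvFirstMatch (seizures : List (List Int)) (d : List Int) : Option Nat :=
  match seizures with
  | [] => none
  | s :: rest =>
    if PySem.List.pyGetD s 0 0 - 45 ≤ PySem.List.pyGetD d 0 0 ∧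
       PySem.List.pyGetD d 0 0 ≤ PySem.List.pyGetD s 1 0 then some 0
    else (pvFirstMatch rest d).map (· + 1)

def multiple_annotated_seizures_evaluation_alt (output_evaluation : List (List Int)) (json_output : List (String × List (List Int))) (annotation : List (String × List (List Int))) : List (List Int) :=
  let detections := pvGetKey json_output "seizure"
  if detections.length == 0 then
    output_evaluation ++ List.replicate (PySem.Dict.ofList annotation).size [1, 0]
  else
    let seizures := pvGetKey annotation "seizure"
    let assigned := detections.map (pvFirstMatch seizures)
    let leftover := detections.filter (fun d => pvFirstMatch seizures d == none)
    let rows := (List.range seizures.length).flatMap (fun k =>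
      let c := assigned.count (some k)
      if c == 0 then [[1, 0]] else List.replicate c [1, 1])
    output_evaluation ++ rows ++ leftover.map (fun _ => [0, 1])

-- ===== PRECONDITION & SPEC =====
-- Pre_ excludes exactly the inputs where the Python raises: a missing "seizure" key (KeyError),
-- an annotated seizure with fewer than 2 entries, or (when at least one seizure is annotated)
-- a detection with no entries (IndexError).
def Pre_multiple_annotated_seizures_evaluation (output_evaluation : List (List Int)) (json_output : List (String × List (List Int))) (annotation : List (String × List (List Int))) : Prop :=
  (PySem.Dict.ofList json_output).contains "seizure" = true ∧
  (pvGetKey json_output "seizure" ≠ [] →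
    (PySem.Dict.ofList annotation).contains "seizure" = true ∧
    (∀ s ∈ pvGetKey annotation "seizure", 2 ≤ s.length) ∧
    (pvGetKey annotation "seizure" ≠ [] → ∀ d ∈ pvGetKey json_output "seizure", 1 ≤ d.length))
instance (output_evaluation : List (List Int)) (json_output : List (String × List (List Int))) (annotation : List (String × List (List Int))) : Decidable (Pre_multiple_annotated_seizures_evaluation output_evaluation json_output annotation) := by unfold Pre_multiple_annotated_seizures_evaluation; infer_instance

def pvWitness_multiple_annotated_seizures_evaluation : List (List Int) × (List (String × List (List Int))) × (List (String × List (List Int))) :=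
  ([], [("seizure", [[3, 9], [100, 5]])], [("seizure", [[0, 20], [50, 80]])])

def Spec_multiple_annotated_seizures_evaluation (output_evaluation : List (List Int)) (json_output : List (String × List (List Int))) (annotation : List (String × List (List Int))) (out : List (List Int)) : Prop := out = multiple_annotated_seizures_evaluation_alt output_evaluation json_output annotation
instance (output_evaluation : List (List Int)) (json_output : List (String × List (List Int))) (annotation : List (String × List (List Int))) (out : List (List Int)) : Decidable (Spec_multiple_annotated_seizures_evaluation output_evaluation json_output annotation out) := by unfold Spec_multiple_annotated_seizures_evaluation; infer_instance

-- ===== CLAIM (what is proved, stated in full; the proofs are below) =====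
def Claim_equal_multiple_annotated_seizures_evaluation : Prop := ∀ (output_evaluation : List (List Int)) (json_output : List (String × List (List Int))) (annotation : List (String × List (List Int))), Dom_multiple_annotated_seizures_evaluation output_evaluation json_output annotation → Pre_multiple_annotated_seizures_evaluation output_evaluation json_output annotation → Spec_multiple_annotated_seizures_evaluation output_evaluation json_output annotation (multiple_annotated_seizures_evaluation output_evaluation json_output annotation)

-- ===== LEMMAS AND PROOFS =====

-- the detection/seizure match predicate shared by the analyses of both ports
def pvP (seiz d : List Int) : Bool :=
  seizure_good_detection_assertion (PySem.List.pyGetD seiz 0 0) (PySem.List.pyGetD seiz 1 0)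
    (PySem.List.pyGetD d 0 0)

-- clean characterisation of one pass of A's per-seizure helper
def pvRows (seiz : List Int) (js : List (List Int)) : List (List Int) :=
  if js.any (fun d => pvP seiz d) then (js.filter (fun d => pvP seiz d)).map (fun _ => [1, 1])
  else [[1, 0]]

def pvRowsAll : List (List Int) → List (List Int) → List (List Int)
  | [], _ => []
  | s :: ss, js => pvRows s js ++ pvRowsAll ss (js.filter (fun d => !pvP s d))

def pvFinal : List (List Int) → List (List Int) → List (List Int)
  | [], js => js
  | s :: ss, js => pvFinal ss (js.filter (fun d => !pvP s d))

theorem pvDelAt_prefix (y : List Int) :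
    ∀ (I : List Int) (ys : List (List Int)), I.Pairwise (· > ·) →
      (∀ i ∈ I, 0 ≤ i ∧ i < (ys.length : Int)) →
      I.foldl pvDelAt (ys ++ [y]) = I.foldl pvDelAt ys ++ [y] := by
  intro I
  induction I with
  | nil => intro ys _ _; rfl
  | cons i I ih =>
    intro ys hpw hbd
    obtain ⟨hi0, hilt⟩ := hbd i (List.mem_cons_self ..)
    have hn : i = ((i.toNat : Nat) : Int) := by omega
    have hlt : i.toNat < ys.length := by omega
    have hstep : pvDelAt (ys ++ [y]) i = ys.eraseIdx i.toNat ++ [y] := by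
      simp only [pvDelAt]
      rw [hn, PySem.List.pop?_natCast (ys ++ [y]) _ (by simp; omega)]
      simp [List.eraseIdx_append_of_lt_length hlt]
      congr 1; omega
    have hlen : ((ys.eraseIdx i.toNat).length : Int) = (ys.length : Int) - 1 := by
      rw [List.length_eraseIdx]; simp [hlt]; omega
    have htail : ∀ j ∈ I, 0 ≤ j ∧ j < ((ys.eraseIdx i.toNat).length : Int) := by
      intro j hj
      obtain ⟨hj0, hjlt⟩ := hbd j (List.mem_cons_of_mem _ hj)
      have : i > j := (List.pairwise_cons.mp hpw).1 j hj
      constructor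
      · exact hj0
      · rw [hlen]; omega
    have := ih (ys.eraseIdx i.toNat) (List.pairwise_cons.mp hpw).2 htail
    have hstep2 : pvDelAt ys i = ys.eraseIdx i.toNat := by
      simp only [pvDelAt]; rw [hn, PySem.List.pop?_natCast ys _ hlt]; rfl
    simp only [List.foldl_cons, hstep, hstep2]
    exact this

theorem pvDelFold (q : List Int → Bool) :
    ∀ js : List (List Int),
      (((PySem.List.pyRange 0 js.length 1).filter
          (fun j => q (PySem.List.pyGetD js j []))).reverse).foldl pvDelAt js
        = js.filter (fun x => !q x) := by
  intro js
  induction js using List.reverseRecOn with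
  | nil => simp
  | append_singleton ys y ih =>
    have hn : ((ys ++ [y]).length : Int) = (ys.length : Int) + 1 := by simp
    rw [hn, PySem.List.pyRange_one_succ_right (by positivity)]
    have hprefix : ∀ j ∈ PySem.List.pyRange 0 (ys.length : Int) 1,
        PySem.List.pyGetD (ys ++ [y]) j [] = PySem.List.pyGetD ys j [] := by
      intro j hj
      obtain ⟨hj0, hjlt⟩ := PySem.List.mem_pyRange_one.mp hj
      rw [PySem.List.pyGetD_eq_getElem _ _ hj0 (by simp; omega),
        PySem.List.pyGetD_eq_getElem _ _ hj0 (by omega)]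
      exact List.getElem_append_left (by omega)
    have hlast : PySem.List.pyGetD (ys ++ [y]) (ys.length : Int) [] = y := by
      rw [PySem.List.pyGetD_natCast]
      simp [List.getD]
    rw [List.filter_append, List.filter_congr (fun j hj => by rw [hprefix j hj])]
    have hFpw : (List.filter (fun j => q (PySem.List.pyGetD ys j [])) (PySem.List.pyRange 0 (ys.length:Int) 1)).reverse.Pairwise (· > ·) := by
      rw [List.pairwise_reverse]
      exact (PySem.List.pairwise_lt_pyRange_one 0 (ys.length:Int)).filter _
    have hFbd : ∀ i ∈ (List.filter (fun j => q (PySem.List.pyGetD ys j [])) (PySem.List.pyRange 0 (ys.length:Int) 1)).reverse, 0 ≤ i ∧ i < (ys.length : Int) := by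
      intro i hi
      rw [List.mem_reverse] at hi
      exact PySem.List.mem_pyRange_one.mp (List.mem_of_mem_filter hi)
    by_cases hy : q y
    · simp only [List.filter_cons, hlast, hy, if_pos, List.filter_nil, List.reverse_append,
        List.reverse_cons, List.reverse_nil, List.nil_append]
      have hdel : pvDelAt (ys ++ [y]) (ys.length : Int) = ys := by
        simp only [pvDelAt]
        rw [PySem.List.pop?_natCast (ys ++ [y]) ys.length (by simp)]
        simp [List.eraseIdx_append_of_length_le (Nat.le_refl _)]
      rw [List.singleton_append, List.foldl_cons, hdel, List.filter_append]
      simp [hy, ih]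
    · simp only [List.filter_cons, hlast, hy, List.filter_nil, List.reverse_append,
        List.reverse_nil, List.nil_append, Bool.false_eq_true, if_neg, not_false_iff]
      rw [pvDelAt_prefix y _ ys hFpw hFbd, ih, List.filter_append]
      simp [hy]

theorem pvStep_eq (oe js : List (List Int)) (ann : List (String × List (List Int))) (sn : Int) :
    evaluation_on_one_of_the_multiple_annotated_seizures oe js ann sn
      = (oe ++ pvRows (PySem.List.pyGetD (pvGetKey ann "seizure") sn []) js,
         js.filter (fun d => !pvP (PySem.List.pyGetD (pvGetKey ann "seizure") sn []) d)) := by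
  simp only [evaluation_on_one_of_the_multiple_annotated_seizures]
  set seiz := PySem.List.pyGetD (pvGetKey ann "seizure") sn [] with hseiz
  have hcong := PySem.List.foldl_congr_mem' (PySem.List.pyRange 0 js.length 1)
    (fun (st : List Int × List (List Int) × Bool) dn =>
      if seizure_good_detection_assertion (PySem.List.pyGetD seiz 0 0) (PySem.List.pyGetD seiz 1 0)
          (PySem.List.pyGetD (PySem.List.pyGetD js dn []) 0 0) then
        (st.1 ++ [dn], st.2.1 ++ [[1, 1]], true)
      else st)
    (fun (st : List Int × List (List Int) × Bool) dn =>
      ((fun (g : List Int) dn => if pvP seiz (PySem.List.pyGetD js dn []) then g ++ [dn] else g) st.1 dn,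
       (fun (st2 : List (List Int) × Bool) dn =>
         ((fun (o : List (List Int)) dn => if pvP seiz (PySem.List.pyGetD js dn []) then o ++ [[1, 1]] else o) st2.1 dn,
          (fun (b : Bool) dn => if pvP seiz (PySem.List.pyGetD js dn []) then true else b) st2.2 dn)) st.2 dn))
    ([], oe, false)
    (by intro x _ acc
        simp only [pvP]
        by_cases h : seizure_good_detection_assertion (PySem.List.pyGetD seiz 0 0)
          (PySem.List.pyGetD seiz 1 0) (PySem.List.pyGetD (PySem.List.pyGetD js x []) 0 0) <;>
          simp [h])
  have h1 := PySem.List.foldl_prod_mk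
    (fun (g : List Int) (dn : Int) => if pvP seiz (PySem.List.pyGetD js dn []) then g ++ [dn] else g)
    (fun (st2 : List (List Int) × Bool) (dn : Int) =>
      ((fun (o : List (List Int)) (dn : Int) => if pvP seiz (PySem.List.pyGetD js dn []) then o ++ [[1, 1]] else o) st2.1 dn,
       (fun (b : Bool) (dn : Int) => if pvP seiz (PySem.List.pyGetD js dn []) then true else b) st2.2 dn))
    (PySem.List.pyRange 0 js.length 1) [] (oe, false)
  have h2 := PySem.List.foldl_prod_mk
    (fun (o : List (List Int)) (dn : Int) => if pvP seiz (PySem.List.pyGetD js dn []) then o ++ [[1, 1]] else o)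
    (fun (b : Bool) (dn : Int) => if pvP seiz (PySem.List.pyGetD js dn []) then true else b)
    (PySem.List.pyRange 0 js.length 1) oe false
  rw [h2] at h1
  rw [hcong, h1]
  rw [PySem.List.foldl_append_if_eq_filter (fun dn => pvP seiz (PySem.List.pyGetD js dn []))]
  rw [PySem.List.foldl_append_if (fun dn => pvP seiz (PySem.List.pyGetD js dn [])) (fun _ => ([1, 1] : List Int))]
  rw [PySem.List.foldl_if_true_eq (fun dn => pvP seiz (PySem.List.pyGetD js dn []))]
  have hmap := PySem.List.map_pyGetD_pyRange_zero' js ([] : List Int)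
  have hany : (PySem.List.pyRange 0 js.length 1).any (fun dn => pvP seiz (PySem.List.pyGetD js dn [])) = js.any (fun d => pvP seiz d) := by
    conv_rhs => rw [← hmap]
    rw [List.any_map]; rfl
  have hfilt : js.filter (fun d => pvP seiz d) = ((PySem.List.pyRange 0 js.length 1).filter (fun dn => pvP seiz (PySem.List.pyGetD js dn []))).map (fun j => PySem.List.pyGetD js j []) := by
    conv_lhs => rw [← hmap]
    rw [List.filter_map]; rfl
  have hmapc : (List.filter (fun dn => pvP seiz (PySem.List.pyGetD js dn [])) (PySem.List.pyRange 0 js.length 1)).map (fun _ => ([1, 1] : List Int)) = (js.filter (fun d => pvP seiz d)).map (fun _ => [1, 1]) := by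
    rw [hfilt, List.map_map]; rfl
  simp only [Bool.false_or, List.nil_append, pvRows, hany, hmapc]
  rw [Prod.mk.injEq]
  refine ⟨?_, ?_⟩
  · by_cases hA : js.any (fun d => pvP seiz d)
    · simp [hA]
    · have hnil : List.filter (fun d => pvP seiz d) js = [] := by
        rw [List.filter_eq_nil_iff]
        intro a ha
        exact fun hc => (Bool.not_eq_true _).mpr (Bool.eq_false_iff.mpr (fun _ => hA (List.any_of_mem ha hc))) hc
      simp [hA, hnil]
  · -- deletion part
    have hsorted : PySem.List.sorted (List.filter (fun dn => pvP seiz (PySem.List.pyGetD js dn [])) (PySem.List.pyRange 0 js.length 1)) (fun x => x) true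
        = (List.filter (fun dn => pvP seiz (PySem.List.pyGetD js dn [])) (PySem.List.pyRange 0 js.length 1)).reverse := by
      apply PySem.List.sorted_rev_eq_of_perm_of_pairwise_gt
      · exact (List.filter _ _).reverse_perm
      · rw [List.pairwise_reverse]
        exact (PySem.List.pairwise_lt_pyRange_one 0 (js.length : Int)).filter _
    rw [hsorted, pvDelFold (fun d => pvP seiz d) js]

theorem pvFirstMatch_cons (s : List Int) (ss : List (List Int)) (d : List Int) :
    pvFirstMatch (s :: ss) d
      = if pvP s d then some 0 else (pvFirstMatch ss d).map (· + 1) := by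
  simp [pvFirstMatch, pvP, seizure_good_detection_assertion, ge_iff_le]

theorem pvMatch0 (s : List Int) (ss : List (List Int)) (d : List Int) :
    (pvFirstMatch (s :: ss) d == some 0) = pvP s d := by
  rw [pvFirstMatch_cons]
  by_cases h : pvP s d
  · simp [h]
  · simp only [h, Bool.false_eq_true, if_false]
    cases pvFirstMatch ss d <;> simp

theorem pvMatchS (s : List Int) (ss : List (List Int)) (d : List Int) (k : Nat) :
    (pvFirstMatch (s :: ss) d == some (k + 1)) = (!pvP s d && (pvFirstMatch ss d == some k)) := by
  rw [pvFirstMatch_cons]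
  by_cases h : pvP s d
  · simp [h]
  · cases pvFirstMatch ss d <;> simp [h]

theorem pvMatchN (s : List Int) (ss : List (List Int)) (d : List Int) :
    (pvFirstMatch (s :: ss) d == none) = (!pvP s d && (pvFirstMatch ss d == none)) := by
  rw [pvFirstMatch_cons]
  by_cases h : pvP s d
  · simp [h]
  · cases pvFirstMatch ss d <;> simp [h]

theorem pvLeftover_eq (as : List (List Int)) :
    ∀ js : List (List Int),
      pvFinal as js = js.filter (fun d => pvFirstMatch as d == none) := by
  induction as with
  | nil => intro js; simp [pvFinal, pvFirstMatch]
  | cons s ss ih =>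
    intro js
    rw [pvFinal, ih, List.filter_filter]
    apply List.filter_congr
    intro d _
    rw [pvMatchN, Bool.and_comm]

theorem pvRowsB_eq (as : List (List Int)) :
    ∀ js : List (List Int),
      pvRowsAll as js
        = (List.range as.length).flatMap (fun k =>
            let c := (js.map (pvFirstMatch as)).count (some k)
            if c == 0 then [[1, 0]] else List.replicate c [1, 1]) := by
  induction as with
  | nil => intro js; simp [pvRowsAll]
  | cons s ss ih =>
    intro js
    have hcount : ∀ (v : Option Nat) (l : List (List Int)) (f : List Int → Option Nat),
        (l.map f).count v = l.countP (fun d => f d == v) := by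
      intro v l f
      rw [List.count, List.countP_map]
      rfl
    have hc0 : (js.map (pvFirstMatch (s :: ss))).count (some 0) = (js.filter (fun d => pvP s d)).length := by
      rw [hcount, ← List.countP_eq_length_filter]
      exact List.countP_congr (fun d _ => by simp [pvMatch0 s ss d])
    have hcS : ∀ k : Nat, (js.map (pvFirstMatch (s :: ss))).count (some (k + 1))
        = ((js.filter (fun d => !pvP s d)).map (pvFirstMatch ss)).count (some k) := by
      intro k
      rw [hcount, hcount, List.countP_filter]
      exact List.countP_congr (fun d _ => by simp [pvMatchS s ss d k, Bool.and_comm])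
    rw [pvRowsAll, ih, List.length_cons, List.range_succ_eq_map, List.flatMap_cons, List.flatMap_map]
    congr 1
    · -- head chunk equals pvRows s js
      simp only [hc0, pvRows]
      by_cases hA : js.any (fun d => pvP s d)
      · have hne : (js.filter (fun d => pvP s d)).length ≠ 0 := by
          simp only [ne_eq, List.length_eq_zero_iff, List.filter_eq_nil_iff]
          intro h
          obtain ⟨d, hd, hp⟩ := List.any_eq_true.mp hA
          exact h d hd hp
        simp only [hA, if_true]
        rw [List.map_const']
        simp [hne]
      · have hnil : List.filter (fun d => pvP s d) js = [] := by
          rw [List.filter_eq_nil_iff]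
          intro d hd hp
          exact (Bool.not_eq_true _).mpr (Bool.eq_false_iff.mpr (fun _ => hA (List.any_of_mem hd hp))) hp
        simp [hA, hnil]
    · refine List.flatMap_congr ?_
      intro k _
      simp only [hcS k]

-- A's seizure loop, characterised
theorem pvFoldA (as : List (List Int)) :
    ∀ (oe js : List (List Int)),
      (as.foldl (fun (st : List (List Int) × List (List Int)) seiz =>
          (st.1 ++ pvRows seiz st.2, st.2.filter (fun d => !pvP seiz d))) (oe, js))
        = (oe ++ pvRowsAll as js, pvFinal as js) := by
  induction as with
  | nil => intro oe js; simp [pvRowsAll, pvFinal]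
  | cons s ss ih => intro oe js; simp [pvRowsAll, pvFinal, ih]

-- ===== VERDICT (by name: the statement is the Claim_ definition above) =====
theorem multiple_annotated_seizures_evaluation_spec : Claim_equal_multiple_annotated_seizures_evaluation := by
  intro oe json ann _ _
  unfold Spec_multiple_annotated_seizures_evaluation
  by_cases h0 : ((pvGetKey json "seizure").length == 0) = true
  · simp only [multiple_annotated_seizures_evaluation, multiple_annotated_seizures_evaluation_alt,
      h0, if_true]
    rw [PySem.List.foldl_append_singleton_eq_map (fun _ => ([1, 0] : List Int))]
    rw [List.map_const', PySem.List.length_pyRange_one]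
    norm_num
  · simp only [multiple_annotated_seizures_evaluation, multiple_annotated_seizures_evaluation_alt,
      h0]
    set js0 := pvGetKey json "seizure" with hjs0
    set as := pvGetKey ann "seizure" with has
    have hbody := PySem.List.foldl_congr_mem' (PySem.List.pyRange 0 as.length 1)
      (fun (st : List (List Int) × List (List Int)) sn =>
        evaluation_on_one_of_the_multiple_annotated_seizures st.1 st.2 ann sn)
      (fun (st : List (List Int) × List (List Int)) sn =>
        (fun (st : List (List Int) × List (List Int)) (seiz : List Int) =>
          (st.1 ++ pvRows seiz st.2, st.2.filter (fun d => !pvP seiz d))) st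
          (PySem.List.pyGetD as sn []))
      (oe, js0)
      (by intro sn _ st
          beta_reduce
          rw [pvStep_eq st.1 st.2 ann sn, ← has])
    rw [hbody,
      PySem.List.foldl_pyRange_zero_pyGetD' as ([] : List Int)
        (fun (st : List (List Int) × List (List Int)) (seiz : List Int) =>
          (st.1 ++ pvRows seiz st.2, st.2.filter (fun d => !pvP seiz d))) (oe, js0),
      pvFoldA as oe js0, ← pvRowsB_eq as js0, ← pvLeftover_eq as js0]
    by_cases hF : pvFinal as js0 = []
    · simp [hF]
    · have hgt : (pvFinal as js0).length > 0 := List.length_pos_of_ne_nil hF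
      simp only [hgt, if_pos]
      rw [PySem.List.foldl_append_singleton_eq_map (fun _ => ([0, 1] : List Int))]
      rw [List.map_const', List.map_const', PySem.List.length_pyRange_one, List.append_assoc]
      norm_num
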